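-- pv_equiv track=rewrite | github.com/oumi-ai/oumi | src/oumi/core/analyze/column_utils.py | get_analyzer_columns_by_analyzer
-- ===== SOURCE A (Python) =====
-- from typing import NamedTuple
--
-- class AnalyzerColumnInfo(NamedTuple):
--     """Parsed information from an analyzer column name."""
--
--     source_column: str
--     """The original source column that was analyzed."""
--
--     analyzer_id: str
--     """The instance ID of the analyzer that generated this column.
--
--     This is the unique identifier for the analyzer instance, which may
--     differ from the analyzer type (e.g., 'response_quality' vs
--     'llm_judge').
--     """
--
--     metric_name: str
--     """The specific metric name for this column."""
--
-- def parse_analyzer_column_name(column_name: str) -> AnalyzerColumnInfo | None: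
--     """Parse an analyzer column name into its components.
--
--     Args:
--         column_name: Column name to parse.
--
--     Returns:
--         AnalyzerColumnInfo with source_column, analyzer_id (instance ID),
--         and metric_name, or None if the column name doesn't match the
--         analyzer format.
--
--     Examples:
--         >>> parse_analyzer_column_name('text_content__quality__has_pii')
--         AnalyzerColumnInfo(source_column='text_content', \
-- analyzer_id='quality', metric_name='has_pii')
--
--         >>> parse_analyzer_column_name(
--         ...     'text_content__response_quality__score'
--         ... )
--         AnalyzerColumnInfo(source_column='text_content', \
-- analyzer_id='response_quality', metric_name='score')
--
--         >>> parse_analyzer_column_name('regular_column')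
--         None
--     """
--     parts = column_name.split("__")
--     if len(parts) == 3:
--         return AnalyzerColumnInfo(
--             source_column=parts[0], analyzer_id=parts[1], metric_name=parts[2]
--         )
--     return None
--
-- def get_analyzer_columns_by_analyzer(columns: list[str]) -> dict[str, list[str]]:
--     """Group analyzer columns by their analyzer instance ID.
--
--     Args:
--         columns: List of column names.
--
--     Returns:
--         Dictionary mapping analyzer instance ID to list of analyzer columns.
--         When using multiple instances of the same analyzer type, each instance
--         will have a separate entry in the dictionary.
--
--     Examples:
--         >>> cols = ['text_content__quality__has_pii', 'text_content__ifd__score',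
--         ...         'other_col__quality__score', 'regular_col']
--         >>> get_analyzer_columns_by_analyzer(cols)
--         {'quality': ['text_content__quality__has_pii', 'other_col__quality__score'],
--          'ifd': ['text_content__ifd__score']}
--
--         >>> # With multiple instances of same analyzer type
--         >>> cols = [
--         ...     'text_content__response_quality__score',
--         ...     'text_content__instruction_quality__score'
--         ... ]
--         >>> get_analyzer_columns_by_analyzer(cols)
--         {'response_quality': ['text_content__response_quality__score'],
--          'instruction_quality': \
-- ['text_content__instruction_quality__score']}
--     """
--     result: dict[str, list[str]] = {}
--     for col in columns:
--         info = parse_analyzer_column_name(col)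
--         if info is not None:
--             if info.analyzer_id not in result:
--                 result[info.analyzer_id] = []
--             result[info.analyzer_id].append(col)
--     return result
-- ===== SOURCE B (Python) =====
-- from typing import NamedTuple
--
--
-- class AnalyzerColumnInfo(NamedTuple):
--     source_column: str
--     analyzer_id: str
--     metric_name: str
--
--
-- def parse_analyzer_column_name(column_name: str):
--     parts = column_name.split("__")
--     if len(parts) == 3:
--         return AnalyzerColumnInfo(
--             source_column=parts[0], analyzer_id=parts[1], metric_name=parts[2]
--         )
--     return None
--
--
-- def get_analyzer_columns_by_analyzer(columns: list[str]) -> dict[str, list[str]]: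
--     pairs = [
--         (info.analyzer_id, col)
--         for col in columns
--         if (info := parse_analyzer_column_name(col)) is not None
--     ]
--     keys = dict.fromkeys(aid for aid, _ in pairs)
--     return {k: [col for aid, col in pairs if aid == k] for k in keys}
-- ===== Notes on version B (the rewrite author's own statement) =====
-- stated objective: alternative
-- what changed: A builds the grouping incrementally in one pass, mutating a dict bucket per column; B first materialises the (analyzer_id, column) pair list, deduplicates the ids in first-occurrence order, and builds each group with a per-key comprehension over the pairs.
import Mathlib
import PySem

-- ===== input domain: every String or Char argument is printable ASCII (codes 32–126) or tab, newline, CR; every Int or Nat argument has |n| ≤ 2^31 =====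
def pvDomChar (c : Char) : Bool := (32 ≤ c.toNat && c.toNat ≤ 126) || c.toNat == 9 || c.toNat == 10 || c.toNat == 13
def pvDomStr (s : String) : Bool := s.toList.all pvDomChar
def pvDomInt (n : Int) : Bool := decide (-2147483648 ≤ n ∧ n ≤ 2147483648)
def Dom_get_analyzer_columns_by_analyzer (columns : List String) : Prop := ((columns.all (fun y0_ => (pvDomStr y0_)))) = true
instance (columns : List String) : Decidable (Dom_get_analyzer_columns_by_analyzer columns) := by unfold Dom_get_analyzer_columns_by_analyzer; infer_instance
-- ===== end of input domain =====

-- B replaces A's incremental dict-bucketing loop by a parse-once pipeline: collect the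
-- (analyzer_id, column) pairs, take the first-occurrence-ordered distinct ids, and build each
-- group by one comprehension over the pairs (objective: alternative decomposition, not faster).

-- ===== PORT A =====
-- shared module helper: parse_analyzer_column_name (returns (source_column, analyzer_id, metric_name))
def parse_analyzer_column_name (column_name : String) : Option (String × String × String) :=
  match PySem.Str.split? column_name "__" with
  | none => none  -- unreachable: the separator "__" is nonempty
  | some parts =>
    if h : parts.length = 3 then
      some (parts[0]'(by omega), parts[1]'(by omega), parts[2]'(by omega))
    else none

def get_analyzer_columns_by_analyzer (columns : List String) : List (String × List String) :=
  (columns.foldl (fun result col =>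
      match parse_analyzer_column_name col with
      | none => result
      | some info =>
        let result' := if result.contains info.2.1 then result else result.insert info.2.1 []
        result'.modify info.2.1 [] (· ++ [col]))
    PySem.Dict.empty).items

-- ===== PORT B =====
def get_analyzer_columns_by_analyzer_alt (columns : List String) : List (String × List String) :=
  let pairs := columns.filterMap (fun col =>
    (parse_analyzer_column_name col).map (fun info => (info.2.1, col)))
  let keys := PySem.List.dedup (pairs.map (·.1))
  keys.map (fun k => (k, (pairs.filter (fun p => p.1 == k)).map (·.2)))

-- ===== PRECONDITION & SPEC =====
def Spec_get_analyzer_columns_by_analyzer (columns : List String) (out : List (String × List String)) : Prop := out = get_analyzer_columns_by_analyzer_alt columns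
instance (columns : List String) (out : List (String × List String)) : Decidable (Spec_get_analyzer_columns_by_analyzer columns out) := by unfold Spec_get_analyzer_columns_by_analyzer; infer_instance

-- ===== CLAIM (what is proved, stated in full; the proofs are below) =====
def Claim_equal_get_analyzer_columns_by_analyzer : Prop := ∀ (columns : List String), Dom_get_analyzer_columns_by_analyzer columns → Spec_get_analyzer_columns_by_analyzer columns (get_analyzer_columns_by_analyzer columns)

-- ===== LEMMAS AND PROOFS =====

-- A's "if absent, insert []; then append" step is the plain modify-append step.
lemma insert_nil_modify_eq (d : PySem.Dict String (List String)) (k : String)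
    (f : List String → List String) (h : d.contains k = false) :
    (d.insert k []).modify k [] f = d.modify k [] f := by
  have hk : ∀ p ∈ d.items, p.1 ≠ k := by
    intro p hp hpk
    have hc : d.contains k = true := by
      rw [PySem.Dict.contains_iff_mem_keys]
      simp only [PySem.Dict.keys]
      exact List.mem_map.mpr ⟨p, hp, hpk⟩
    rw [h] at hc; exact Bool.false_ne_true hc
  have hins : (d.insert k []).items = d.items ++ [(k, [])] :=
    PySem.Dict.items_insert_of_not_contains (d := d) (k := k) (v := []) h
  have hgi : (d.insert k []).getD k [] = [] := by
    simp [PySem.Dict.getD_insert_self]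
  have hgd : d.getD k [] = [] :=
    PySem.Dict.getD_of_not_contains (d := d) (k := k) (d0 := []) h
  simp only [PySem.Dict.modify, PySem.Dict.insert, h, Bool.false_eq_true, ↓reduceIte,
    PySem.Dict.contains_mk, List.any_append, List.any_cons, BEq.rfl, List.any_nil,
    Bool.or_false, Bool.or_true, beq_iff_eq, List.map_append, List.map_cons, List.map_nil,
    PySem.Dict.mk.injEq, List.append_singleton_inj, Prod.mk.injEq, true_and]
  constructor
  · conv_rhs => rw [← List.map_id d.items]
    refine List.map_congr_left ?_
    intro p hp
    simp [hk p hp]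
  · rw [hgd]
    have hmk : (⟨d.items ++ [(k, [])]⟩ : PySem.Dict String (List String)) = d.insert k [] := by
      apply PySem.Dict.ext; rw [hins]
    rw [hmk, hgi]

lemma stepA_eq (d : PySem.Dict String (List String)) (k col : String) :
    (let r := if d.contains k then d else d.insert k []
     r.modify k [] (· ++ [col])) = d.modify k [] (· ++ [col]) := by
  by_cases h : d.contains k
  · simp [h]
  · simp only [Bool.not_eq_true] at h
    simp [h, insert_nil_modify_eq d k _ h]

-- A's column loop is the modify-append fold over the parsed (analyzer_id, column) pairs.
lemma foldA_eq (cols : List String) :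
    ∀ d : PySem.Dict String (List String),
      cols.foldl (fun result col =>
          match parse_analyzer_column_name col with
          | none => result
          | some info =>
            let result' := if result.contains info.2.1 then result else result.insert info.2.1 []
            result'.modify info.2.1 [] (· ++ [col])) d
      = (cols.filterMap (fun col =>
            (parse_analyzer_column_name col).map (fun info => (info.2.1, col)))).foldl
          (fun d p => d.modify p.1 [] (· ++ [p.2])) d := by
  induction cols with
  | nil => intro d; rfl
  | cons c rest ih =>
    intro d
    cases hp : parse_analyzer_column_name c with
    | none => simp only [List.foldl_cons, List.filterMap_cons, hp, Option.map_none]; exact ih d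
    | some info =>
      simp only [List.foldl_cons, List.filterMap_cons, hp, Option.map_some]
      rw [stepA_eq d info.2.1 c]
      exact ih _

theorem get_analyzer_columns_by_analyzer_spec : Claim_equal_get_analyzer_columns_by_analyzer := by
  intro columns _
  unfold Spec_get_analyzer_columns_by_analyzer
  unfold get_analyzer_columns_by_analyzer get_analyzer_columns_by_analyzer_alt
  rw [foldA_eq]
  set P := columns.filterMap (fun col =>
    (parse_analyzer_column_name col).map (fun info => (info.2.1, col))) with hP
  have hnd : ((P.foldl (fun d p => d.modify p.1 [] (· ++ [p.2])) PySem.Dict.empty).keys).Nodup := by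
    exact PySem.Dict.nodup_keys_foldl_modify_key P Prod.fst [] (fun _ p => (· ++ [p.2]))
      PySem.Dict.empty (by simp)
  rw [PySem.Dict.items_eq_map_keys _ hnd []]
  have hkeys : (P.foldl (fun d p => d.modify p.1 [] (· ++ [p.2])) PySem.Dict.empty).keys
      = PySem.List.dedup (P.map (·.1)) := by
    rw [PySem.Dict.keys_foldl_modify_key P Prod.fst [] (fun _ p => (· ++ [p.2])) PySem.Dict.empty]
    simp [PySem.Dict.keys_empty, PySem.Set.update_nil_left]
  rw [hkeys]
  refine List.map_congr_left ?_
  intro k _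
  rw [PySem.Dict.getD_foldl_modify_append]
  simp [PySem.Dict.getD_empty]
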